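-- pv_equiv track=rewrite | github.com/tensorflow/tensorflow | tensorflow/python/autograph/tests/loop_scoping_test.py | for_with_lambda_iter
-- ===== SOURCE A (Python) =====
-- def for_with_lambda_iter(l):
--   fns = []
--   results = []
--   for i in l:
--     fns.append(lambda: i)
--   for f in fns:
--     results.append(f())
--   return results
-- ===== SOURCE B (Python) =====
-- def for_with_lambda_iter(l):
--   last = None
--   n = 0
--   for x in l:
--     last = x
--     n += 1
--   return [last] * n
-- ===== Notes on version B (the rewrite author's own statement) =====
-- stated objective: simpler
-- what changed: Replaces the lambda-building loop plus calling loop with a single pass that tracks the last element and a count, returning [last]*n (the late-binding closures all yield the final loop value).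
import Mathlib
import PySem

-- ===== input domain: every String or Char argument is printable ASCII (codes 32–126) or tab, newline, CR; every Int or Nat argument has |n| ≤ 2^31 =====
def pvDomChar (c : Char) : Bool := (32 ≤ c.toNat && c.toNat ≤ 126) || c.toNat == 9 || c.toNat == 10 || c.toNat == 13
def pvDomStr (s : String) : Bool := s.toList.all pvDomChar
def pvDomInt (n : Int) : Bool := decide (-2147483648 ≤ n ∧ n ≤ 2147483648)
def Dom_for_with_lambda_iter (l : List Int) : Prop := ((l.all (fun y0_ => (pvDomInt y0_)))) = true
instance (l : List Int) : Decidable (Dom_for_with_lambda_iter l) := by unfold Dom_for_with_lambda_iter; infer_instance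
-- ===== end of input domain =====

-- B replaces the lambda-building and calling loops with one pass tracking the last element and a count, returning [last]*n; objective: simpler.


-- ===== PORT A =====
-- Python's `lambda: i` captures the SHARED loop variable cell (late binding): each closure reads
-- the cell's value at call time. Modelled exactly: each appended fn is a function of the cell's
-- value, and the second loop calls it with the cell's value after the first loop (the last i).
def for_with_lambda_iter (l : List Int) : List Int :=
  let st := l.foldl (fun (st : List (Int → Int) × Option Int) i =>
    (st.1 ++ [fun cell => cell], some i)) ([], none)
  st.1.foldl (fun results f => results ++ [f (st.2.getD 0)]) []

-- ===== PORT B =====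
def for_with_lambda_iter_alt (l : List Int) : List Int :=
  let p := l.foldl (fun (p : Option Int × Nat) x => (some x, p.2 + 1)) (none, 0)
  match p.1 with
  | none => []
  | some v => List.replicate p.2 v

-- ===== PRECONDITION & SPEC =====
def Spec_for_with_lambda_iter (l : List Int) (out : List Int) : Prop := out = for_with_lambda_iter_alt l
instance (l : List Int) (out : List Int) : Decidable (Spec_for_with_lambda_iter l out) := by unfold Spec_for_with_lambda_iter; infer_instance

-- ===== CLAIM (what is proved, stated in full; the proofs are below) =====
def Claim_equal_for_with_lambda_iter : Prop := ∀ (l : List Int), Dom_for_with_lambda_iter l → Spec_for_with_lambda_iter l (for_with_lambda_iter l)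

-- ===== LEMMAS AND PROOFS =====

-- A's first loop: appends one identity-on-the-cell fn per element and records the last element.
theorem foldA_eq (l : List Int) (fns : List (Int → Int)) (i0 : Option Int) :
    l.foldl (fun (st : List (Int → Int) × Option Int) i => (st.1 ++ [fun cell => cell], some i)) (fns, i0)
      = (fns ++ List.replicate l.length (fun cell => cell), match l.getLast? with | none => i0 | some v => some v) := by
  induction l generalizing fns i0 with
  | nil => simp
  | cons x xs ih =>
    simp only [List.foldl_cons, ih, List.length_cons, List.getLast?_cons]
    cases h : xs.getLast? with
    | none =>
      have : xs = [] := List.getLast?_eq_none_iff.mp h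
      subst this; simp [List.replicate]
    | some v =>
      simp [List.replicate_succ, List.append_assoc]

-- A's second loop over a list of fns is mapping each fn over the cell value.
theorem foldA2_eq (fns : List (Int → Int)) (v : Int) (res : List Int) :
    fns.foldl (fun results f => results ++ [f v]) res = res ++ fns.map (fun f => f v) := by
  induction fns generalizing res with
  | nil => simp
  | cons f fs ih => simp [ih]

-- B's loop: records the last element and adds the length to the counter.
theorem foldB_eq (l : List Int) (o0 : Option Int) (n0 : Nat) :
    l.foldl (fun (p : Option Int × Nat) x => (some x, p.2 + 1)) (o0, n0)
      = ((match l.getLast? with | none => o0 | some v => some v), n0 + l.length) := by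
  induction l generalizing o0 n0 with
  | nil => simp
  | cons x xs ih =>
    simp only [List.foldl_cons, ih, List.length_cons, List.getLast?_cons]
    cases h : xs.getLast? with
    | none =>
      have : xs = [] := List.getLast?_eq_none_iff.mp h
      subst this; simp
    | some v =>
      simp; omega

-- ===== VERDICT (by name: the statement is the Claim_ definition above) =====
theorem for_with_lambda_iter_spec : Claim_equal_for_with_lambda_iter := by
  intro l _
  unfold Spec_for_with_lambda_iter for_with_lambda_iter for_with_lambda_iter_alt
  simp only [foldA_eq, foldB_eq, List.nil_append, Nat.zero_add]
  cases h : l.getLast? with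
  | none =>
    have : l = [] := List.getLast?_eq_none_iff.mp h
    subst this; simp
  | some v =>
    rw [foldA2_eq]
    simp [List.map_replicate]
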